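-- pv_equiv track=rewrite | github.com/Espacio-root/zen | zen/config-legacy.py | _handle_filters
-- ===== SOURCE A (Python) =====
-- def _handle_filters(filters: list):
--     d_filters = {}
--     filters = list(map(lambda x: [x.split(",")[0], x.split(",")[1:]], filters))
--     for url, filter in filters:
--         if url in d_filters:
--             d_filters[url].extend(filter)
--         else:
--             d_filters[url] = filter
--     return d_filters
-- ===== SOURCE B (Python) =====
-- def _handle_filters(filters: list):
--     keys = []
--     seen = set()
--     for line in filters:
--         k = line.split(",")[0]
--         if k not in seen:
--             seen.add(k)
--             keys.append(k)
--     return {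
--         k: [f for line in filters if line.split(",")[0] == k for f in line.split(",")[1:]]
--         for k in keys
--     }
-- ===== Notes on version B (the rewrite author's own statement) =====
-- stated objective: alternative
-- what changed: A makes one pass mutating a growing dict (extend-or-insert per line); B is two-phase: it first collects the distinct URL keys in first-occurrence order with a seen-set, then builds the result with one comprehension per key gathering all post-comma fields of that key's lines.
import Mathlib
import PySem

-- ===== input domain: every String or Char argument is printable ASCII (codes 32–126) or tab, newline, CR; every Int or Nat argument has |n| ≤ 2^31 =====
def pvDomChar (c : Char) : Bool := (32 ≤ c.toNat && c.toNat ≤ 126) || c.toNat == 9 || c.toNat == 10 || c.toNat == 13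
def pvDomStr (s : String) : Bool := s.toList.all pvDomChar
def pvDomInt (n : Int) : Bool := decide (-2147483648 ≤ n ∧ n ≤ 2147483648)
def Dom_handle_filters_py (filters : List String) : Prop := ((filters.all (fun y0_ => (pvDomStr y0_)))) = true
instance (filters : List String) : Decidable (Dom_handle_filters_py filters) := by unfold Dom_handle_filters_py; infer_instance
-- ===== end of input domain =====

-- B replaces A's single dict-mutating pass by a two-phase plan (collect distinct keys, then gather per key); same values, no speed claim.

-- ===== PORT A =====
-- x.split(",") (sep nonempty, so split? is always some)
def pvParts (x : String) : List String := (PySem.Str.split? x ",").getD []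
-- x.split(",")[0] (split never returns an empty list, so the default is never used)
def pvKey (x : String) : String := PySem.List.pyGetD (pvParts x) 0 ""
-- x.split(",")[1:]
def pvTail (x : String) : List String := PySem.List.slice (pvParts x) (some 1) none

def handle_filters_py (filters : List String) : List (String × List String) :=
  let fs := filters.map (fun x => (pvKey x, pvTail x))
  (fs.foldl
    (fun d p =>
      if d.contains p.1 then d.modify p.1 [] (fun v => v ++ p.2)
      else d.insert p.1 p.2)
    (PySem.Dict.empty : PySem.Dict String (List String))).items

-- ===== PORT B =====
def handle_filters_py_alt (filters : List String) : List (String × List String) :=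
  let ks := (filters.foldl
    (fun (acc : PySem.Set String × List String) line =>
      let k := pvKey line
      if acc.1.contains k then acc else (acc.1.add k, acc.2 ++ [k]))
    (PySem.Set.empty, [])).2
  ks.map (fun k =>
    (k, filters.flatMap (fun line => if pvKey line == k then pvTail line else [])))

-- ===== PRECONDITION & SPEC =====
def Spec_handle_filters_py (filters : List String) (out : List (String × List String)) : Prop := out = handle_filters_py_alt filters
instance (filters : List String) (out : List (String × List String)) : Decidable (Spec_handle_filters_py filters out) := by unfold Spec_handle_filters_py; infer_instance

-- ===== CLAIM (what is proved, stated in full; the proofs are below) =====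
def Claim_equal_handle_filters_py : Prop := ∀ (filters : List String), Dom_handle_filters_py filters → Spec_handle_filters_py filters (handle_filters_py filters)

-- ===== LEMMAS AND PROOFS =====

-- A's branch (extend when present, insert when absent) is exactly one dict modify
theorem pv_step_eq_modify (d : PySem.Dict String (List String)) (p : String × List String) :
    (if d.contains p.1 then d.modify p.1 [] (fun v => v ++ p.2) else d.insert p.1 p.2)
      = d.modify p.1 [] (fun v => v ++ p.2) := by
  cases h : d.contains p.1 with
  | true => simp
  | false =>
      simp only [Bool.false_eq_true, if_false, PySem.Dict.modify]
      rw [PySem.Dict.getD_of_not_contains]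
      · simp
      · exact h

-- value of any key after A's grouping fold
theorem pv_getD_fold (l : List (String × List String)) (d : PySem.Dict String (List String)) (c : String) :
    (l.foldl (fun d p => d.modify p.1 [] (fun v => v ++ p.2)) d).getD c []
      = d.getD c [] ++ l.flatMap (fun p => if p.1 = c then p.2 else []) := by
  induction l generalizing d with
  | nil => simp
  | cons p t ih =>
      simp only [List.foldl_cons, List.flatMap_cons, ih, PySem.Dict.getD_modify]
      by_cases h : p.1 = c
      · subst h; simp
      · rw [if_neg h, if_neg (fun hh => h hh.symm)]; simp

-- B's seen/keys fold keeps keys equal to the seen set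
theorem pv_keys_fold (l : List String) (s : PySem.Set String) :
    (l.foldl
      (fun (acc : PySem.Set String × List String) line =>
        let k := pvKey line
        if acc.1.contains k then acc else (acc.1.add k, acc.2 ++ [k]))
      (s, s))
      = (PySem.Set.update s (l.map pvKey), PySem.Set.update s (l.map pvKey)) := by
  induction l generalizing s with
  | nil => simp [PySem.Set.update]
  | cons x t ih =>
      simp only [List.foldl_cons, List.map_cons, PySem.Set.update, List.foldl_cons]
      cases h : PySem.Set.contains s (pvKey x) with
      | true =>
          have hm : pvKey x ∈ s := by simpa using h
          have hadd : PySem.Set.add s (pvKey x) = s := by simp [PySem.Set.add, hm]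
          simpa [hm, hadd] using ih s
      | false =>
          have hm : ¬ pvKey x ∈ s := by simpa using h
          have hadd : PySem.Set.add s (pvKey x) = s ++ [pvKey x] := by simp [PySem.Set.add, hm]
          simpa [hm, hadd] using ih (s ++ [pvKey x])

-- ===== VERDICT (by name: the statement is the Claim_ definition above) =====
theorem handle_filters_py_spec : Claim_equal_handle_filters_py := by
  intro filters _
  unfold Spec_handle_filters_py handle_filters_py handle_filters_py_alt
  -- A's fold is the pure modify fold
  have hfold :
      (fun (d : PySem.Dict String (List String)) (p : String × List String) =>
        if d.contains p.1 then d.modify p.1 [] (fun v => v ++ p.2) else d.insert p.1 p.2)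
      = (fun d p => d.modify p.1 [] (fun v => v ++ p.2)) :=
    funext fun d => funext fun p => pv_step_eq_modify d p
  rw [hfold]
  set fs := filters.map (fun x => (pvKey x, pvTail x)) with hfs
  set D := fs.foldl (fun d p => d.modify p.1 [] (fun v => v ++ p.2))
      (PySem.Dict.empty : PySem.Dict String (List String)) with hD
  -- A's dict keys: distinct pvKey values in first-occurrence order
  have hkeys : D.keys = PySem.Set.update ([] : PySem.Set String) (filters.map pvKey) := by
    have := PySem.Dict.keys_foldl_modify_key fs Prod.fst []
      (fun _ p => fun v => v ++ p.2) (PySem.Dict.empty : PySem.Dict String (List String))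
    simpa [hfs, List.map_map, Function.comp] using this
  have hnd : D.keys.Nodup := by
    exact PySem.Dict.nodup_keys_foldl_modify_key fs Prod.fst []
      (fun _ p => fun v => v ++ p.2) PySem.Dict.empty (by simp)
  -- A's items = keys paired with the gathered values
  rw [PySem.Dict.items_eq_map_keys D hnd [], hkeys]
  -- B's key list
  rw [show (PySem.Set.empty, ([] : List String)) = (([] : PySem.Set String), ([] : List String)) from rfl,
    pv_keys_fold filters ([] : PySem.Set String)]
  refine List.map_congr_left (fun k _ => ?_)
  -- values agree
  have hv := pv_getD_fold fs (PySem.Dict.empty : PySem.Dict String (List String)) k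
  rw [hD, hv]
  simp [hfs, List.flatMap_map, beq_iff_eq]
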